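-- pv_equiv track=rewrite | github.com/ltvmoon/evidencelab | ui/backend/routes/highlight.py | _build_clean_text_index_map
-- ===== SOURCE A (Python) =====
-- from typing import Any, Dict, List, Optional
--
-- def _build_clean_text_index_map(text: str) -> tuple[str, list[int]]:
--     clean_chars: List[str] = []
--     index_map: List[int] = []
--     i = 0
--     n = len(text)
--     while i < n:
--         if text[i] == "<":
--             j = text.find(">", i)
--             if j != -1:
--                 i = j + 1
--                 continue
--         clean_chars.append(text[i])
--         index_map.append(i)
--         i += 1
--     index_map.append(n)
--     return "".join(clean_chars), index_map
-- ===== SOURCE B (Python) =====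
-- def _build_clean_text_index_map(text: str) -> tuple[str, list[int]]:
--     n = len(text)
--     # Phase 1: precompute tag spans [p, q] (from each '<' to the first following '>').
--     spans = []
--     pos = 0
--     while True:
--         p = text.find("<", pos)
--         if p == -1:
--             break
--         q = text.find(">", p + 1)
--         if q == -1:
--             break
--         spans.append((p, q))
--         pos = q + 1
--     # Phase 2: emit the gaps between consecutive spans.
--     clean_chars = []
--     index_map = []
--     prev = 0
--     for p, q in spans:
--         clean_chars.append(text[prev:p])
--         index_map.extend(range(prev, p))
--         prev = q + 1
--     clean_chars.append(text[prev:n])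
--     index_map.extend(range(prev, n))
--     index_map.append(n)
--     return "".join(clean_chars), index_map
-- ===== Notes on version B (the rewrite author's own statement) =====
-- stated objective: alternative
-- what changed: Replaced A's interleaved char-scan-with-embedded-find while-loop by a two-phase decomposition: first precompute all tag spans (each '<' to its first following '>') with a find/find loop, then emit the inter-span gaps as slices and ranges.
import Mathlib
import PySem

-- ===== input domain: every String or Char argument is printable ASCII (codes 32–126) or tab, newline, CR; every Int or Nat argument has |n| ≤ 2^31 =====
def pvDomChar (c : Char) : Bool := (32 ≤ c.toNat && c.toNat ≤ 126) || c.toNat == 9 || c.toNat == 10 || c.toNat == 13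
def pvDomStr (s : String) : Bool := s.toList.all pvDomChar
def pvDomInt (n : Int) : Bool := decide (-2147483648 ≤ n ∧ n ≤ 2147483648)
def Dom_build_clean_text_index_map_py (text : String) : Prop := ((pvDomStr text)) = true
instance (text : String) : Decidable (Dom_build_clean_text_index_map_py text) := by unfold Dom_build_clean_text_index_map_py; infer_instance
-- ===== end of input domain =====

-- B replaces A's interleaved scan-and-find while-loop by a two-phase decomposition: precompute the
-- tag spans, then emit the gaps between them (objective: alternative; same return value).

-- ===== PORT A =====
-- A's while-loop: on '<' look for the next '>' and jump past it; otherwise record the char and its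
-- index. The fuel argument is a totality guard only (one unit per loop iteration; i grows by at
-- least 1 each iteration, so fuel = len + 1 from i = 0 never runs out).
def loopA (cs : List Char) : Nat → Nat → List Char × List Int
  | 0, _ => ([], [])
  | fuel + 1, i =>
    if i < cs.length then
      if PySem.List.pyGetD cs (i : Int) ' ' = '<' then
        if PySem.Chars.findFrom cs ['>'] (i : Int) ≠ -1 then
          loopA cs fuel ((PySem.Chars.findFrom cs ['>'] (i : Int)).toNat + 1)
        else
          (PySem.List.pyGetD cs (i : Int) ' ' :: (loopA cs fuel (i + 1)).1,
           (i : Int) :: (loopA cs fuel (i + 1)).2)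
      else
        (PySem.List.pyGetD cs (i : Int) ' ' :: (loopA cs fuel (i + 1)).1,
         (i : Int) :: (loopA cs fuel (i + 1)).2)
    else ([], [])

def build_clean_text_index_map_py (text : String) : String × List Int :=
  (String.mk (loopA text.toList (text.toList.length + 1) 0).1,
   (loopA text.toList (text.toList.length + 1) 0).2 ++ [(text.toList.length : Int)])

-- ===== PORT B =====
-- Phase 1 of B: the list of tag spans (p, q), each from a '<' to the first following '>'.
-- Fuel is a totality guard only (one unit per span; pos strictly grows past each span).
def tagsB (cs : List Char) : Nat → Nat → List (Nat × Nat)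
  | 0, _ => []
  | fuel + 1, pos =>
    if PySem.Chars.findFrom cs ['<'] (pos : Int) ≠ -1 then
      if PySem.Chars.findFrom cs ['>']
          (((PySem.Chars.findFrom cs ['<'] (pos : Int)).toNat + 1 : Nat) : Int) ≠ -1 then
        ((PySem.Chars.findFrom cs ['<'] (pos : Int)).toNat,
         (PySem.Chars.findFrom cs ['>']
            (((PySem.Chars.findFrom cs ['<'] (pos : Int)).toNat + 1 : Nat) : Int)).toNat)
        :: tagsB cs fuel ((PySem.Chars.findFrom cs ['>']
            (((PySem.Chars.findFrom cs ['<'] (pos : Int)).toNat + 1 : Nat) : Int)).toNat + 1)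
      else []
    else []

-- Phase 2 of B: one fold over the spans, emitting the gap before each span (slice + range).
def altStep (cs : List Char) (acc : List Char × List Int × Nat) (pq : Nat × Nat) :
    List Char × List Int × Nat :=
  (acc.1 ++ PySem.List.slice cs (some (acc.2.2 : Int)) (some (pq.1 : Int)),
   acc.2.1 ++ PySem.List.pyRange (acc.2.2 : Int) (pq.1 : Int) 1,
   pq.2 + 1)

def build_clean_text_index_map_py_alt (text : String) : String × List Int :=
  let cs := text.toList
  let n := cs.length
  let a := (tagsB cs (n + 1) 0).foldl (altStep cs) ([], [], 0)
  (String.mk (a.1 ++ PySem.List.slice cs (some (a.2.2 : Int)) (some (n : Int))),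
   a.2.1 ++ (PySem.List.pyRange (a.2.2 : Int) (n : Int) 1 ++ [(n : Int)]))

-- ===== PRECONDITION & SPEC =====
def Spec_build_clean_text_index_map_py (text : String) (out : String × List Int) : Prop := out = build_clean_text_index_map_py_alt text
instance (text : String) (out : String × List Int) : Decidable (Spec_build_clean_text_index_map_py text out) := by unfold Spec_build_clean_text_index_map_py; infer_instance

-- ===== CLAIM (what is proved, stated in full; the proofs are below) =====
def Claim_equal_build_clean_text_index_map_py : Prop := ∀ (text : String), Dom_build_clean_text_index_map_py text → Spec_build_clean_text_index_map_py text (build_clean_text_index_map_py text)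

-- ===== LEMMAS AND PROOFS =====

-- Facts about str.find(c, k) for a one-character needle.
theorem pv_prefix_singleton_iff (cs : List Char) (c : Char) (j : Nat) :
    [c] <+: cs.drop j ↔ cs[j]? = some c := by
  constructor
  · rintro ⟨t, ht⟩
    have h0 : (cs.drop j)[0]? = some c := by rw [← ht]; rfl
    simpa [List.getElem?_drop] using h0
  · intro hc
    have h0 : (cs.drop j)[0]? = some c := by simp [List.getElem?_drop, hc]
    cases hd : cs.drop j with
    | nil => rw [hd] at h0; simp at h0
    | cons a t =>
      rw [hd] at h0
      simp at h0
      exact ⟨t, by simp [h0]⟩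

theorem pv_ff_eq_neg_one_iff (cs : List Char) (c : Char) (k : Nat) (hk : k ≤ cs.length) :
    PySem.Chars.findFrom cs [c] (k : Int) = -1 ↔ ∀ m, k ≤ m → cs[m]? ≠ some c := by
  rw [PySem.Chars.findFrom_natCast_eq_neg_one_iff cs [c] k hk]
  have key : ([c] <:+: cs.drop k) ↔ ∃ m, k ≤ m ∧ cs[m]? = some c := by
    constructor
    · intro hinf
      have hc : c ∈ cs.drop k := hinf.sublist.subset (by simp)
      obtain ⟨jj, hj, hv⟩ := List.getElem_of_mem hc
      refine ⟨k + jj, by omega, ?_⟩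
      rw [← List.getElem?_drop, List.getElem?_eq_getElem hj, hv]
    · rintro ⟨m, hm, hv⟩
      have hpre : [c] <+: (cs.drop k).drop (m - k) := by
        rw [List.drop_drop, pv_prefix_singleton_iff]
        convert hv using 2
        omega
      exact hpre.isInfix.trans (List.drop_suffix _ _).isInfix
  rw [key]
  push_neg
  rfl

theorem pv_ff_spec (cs : List Char) (c : Char) (k : Nat) (hk : k ≤ cs.length)
    (h : PySem.Chars.findFrom cs [c] (k : Int) ≠ -1) :
    (k : Int) ≤ PySem.Chars.findFrom cs [c] (k : Int) ∧
    k ≤ (PySem.Chars.findFrom cs [c] (k : Int)).toNat ∧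
    (PySem.Chars.findFrom cs [c] (k : Int)).toNat < cs.length ∧
    cs[(PySem.Chars.findFrom cs [c] (k : Int)).toNat]? = some c ∧
    ∀ m, k ≤ m → m < (PySem.Chars.findFrom cs [c] (k : Int)).toNat → cs[m]? ≠ some c := by
  obtain ⟨h1, h2, h3⟩ := PySem.Chars.findFrom_natCast_spec cs [c] k hk h
  have hget := (pv_prefix_singleton_iff cs c _).mp h2
  have hlt : (PySem.Chars.findFrom cs [c] (k : Int)).toNat < cs.length := by
    obtain ⟨hh, _⟩ := List.getElem?_eq_some_iff.mp hget
    exact hh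
  exact ⟨h1, by omega, hlt, hget,
    fun m hm1 hm2 hmem => h3 m hm1 hm2 ((pv_prefix_singleton_iff cs c m).mpr hmem)⟩

theorem pv_ff_uniq (cs : List Char) (c : Char) (k j : Nat) (hk : k ≤ cs.length) (hkj : k ≤ j)
    (hj : cs[j]? = some c) (hmin : ∀ m, k ≤ m → m < j → cs[m]? ≠ some c) :
    PySem.Chars.findFrom cs [c] (k : Int) = (j : Int) := by
  have hne : PySem.Chars.findFrom cs [c] (k : Int) ≠ -1 := by
    rw [ne_eq, pv_ff_eq_neg_one_iff cs c k hk]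
    push_neg
    exact ⟨j, hkj, hj⟩
  obtain ⟨h0, h1, h2, h3, h4⟩ := pv_ff_spec cs c k hk hne
  have heq : (PySem.Chars.findFrom cs [c] (k : Int)).toNat = j := by
    rcases lt_trichotomy (PySem.Chars.findFrom cs [c] (k : Int)).toNat j with hlt | he | hgt
    · exact absurd h3 (hmin _ h1 hlt)
    · exact he
    · exact absurd hj (h4 j hkj hgt)
  omega

theorem pv_ff_step (cs : List Char) (c : Char) (k : Nat) (hk : k < cs.length)
    (hne : cs[k]? ≠ some c) :
    PySem.Chars.findFrom cs [c] ((k + 1 : Nat) : Int) = PySem.Chars.findFrom cs [c] (k : Int) := by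
  by_cases hI : PySem.Chars.findFrom cs [c] ((k + 1 : Nat) : Int) = -1
  · rw [hI]
    symm
    rw [pv_ff_eq_neg_one_iff cs c k (le_of_lt hk)]
    intro m hm
    rcases Nat.eq_or_lt_of_le hm with he | hlt
    · rw [← he]; exact hne
    · exact (pv_ff_eq_neg_one_iff cs c (k + 1) (by omega)).mp hI m (by omega)
  · obtain ⟨h0, h1, h2, h3, h4⟩ := pv_ff_spec cs c (k + 1) (by omega) hI
    have hj : PySem.Chars.findFrom cs [c] ((k + 1 : Nat) : Int)
        = ((PySem.Chars.findFrom cs [c] ((k + 1 : Nat) : Int)).toNat : Int) := by omega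
    rw [hj]
    symm
    refine pv_ff_uniq cs c k _ (le_of_lt hk) (by omega) h3 ?_
    intro m hm hlt
    rcases Nat.eq_or_lt_of_le hm with he | hlt2
    · rw [← he]; exact hne
    · exact h4 m (by omega) hlt

-- What B's fold computes, written as structural recursion over the span list (proof-side only).
def pvEmit (cs : List Char) : List (Nat × Nat) → Nat → List Char × List Int
  | [], prev => (cs.drop prev, PySem.List.pyRange (prev : Int) (cs.length : Int) 1)
  | (p, q) :: rest, prev =>
    ((cs.drop prev).take (p - prev) ++ (pvEmit cs rest (q + 1)).1,
     PySem.List.pyRange (prev : Int) (p : Int) 1 ++ (pvEmit cs rest (q + 1)).2)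

theorem pv_slice_drop (cs : List Char) (prev : Nat) :
    PySem.List.slice cs (some (prev : Int)) (some (cs.length : Int)) = cs.drop prev := by
  rw [PySem.List.slice_natCast]
  exact List.take_of_length_le (by simp)

theorem pv_fold_emit (cs : List Char) (spans : List (Nat × Nat)) :
    ∀ (c0 : List Char) (m0 : List Int) (prev : Nat),
    ((spans.foldl (altStep cs) (c0, m0, prev)).1
        ++ cs.drop (spans.foldl (altStep cs) (c0, m0, prev)).2.2
      = c0 ++ (pvEmit cs spans prev).1) ∧
    ((spans.foldl (altStep cs) (c0, m0, prev)).2.1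
        ++ PySem.List.pyRange (((spans.foldl (altStep cs) (c0, m0, prev)).2.2 : Nat) : Int)
            (cs.length : Int) 1
      = m0 ++ (pvEmit cs spans prev).2) := by
  induction spans with
  | nil => intro c0 m0 prev; simp [pvEmit]
  | cons pq rest IH =>
    intro c0 m0 prev
    obtain ⟨p, q⟩ := pq
    obtain ⟨ih1, ih2⟩ := IH (c0 ++ PySem.List.slice cs (some (prev : Int)) (some (p : Int)))
      (m0 ++ PySem.List.pyRange (prev : Int) (p : Int) 1) (q + 1)
    constructor
    · rw [List.foldl_cons]
      show ((rest.foldl (altStep cs) (altStep cs (c0, m0, prev) (p, q))).1 ++ _ = _)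
      simp only [altStep] at ih1 ⊢
      rw [ih1, PySem.List.slice_natCast]
      simp [pvEmit, List.append_assoc]
    · rw [List.foldl_cons]
      show ((rest.foldl (altStep cs) (altStep cs (c0, m0, prev) (p, q))).2.1 ++ _ = _)
      simp only [altStep] at ih2 ⊢
      rw [ih2]
      simp [pvEmit, List.append_assoc]

theorem pv_tags_nogt (cs : List Char) (fuel pos : Nat) (hpos : pos ≤ cs.length)
    (hno : ∀ m, pos ≤ m → cs[m]? ≠ some '>') : tagsB cs fuel pos = [] := by
  cases fuel with
  | zero => rfl
  | succ f =>
    simp only [tagsB]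
    by_cases hp : PySem.Chars.findFrom cs ['<'] (pos : Int) ≠ -1
    · rw [if_pos hp]
      obtain ⟨_, h1, h2, _, _⟩ := pv_ff_spec cs '<' pos hpos hp
      have hq : PySem.Chars.findFrom cs ['>']
          (((PySem.Chars.findFrom cs ['<'] (pos : Int)).toNat + 1 : Nat) : Int) = -1 := by
        rw [pv_ff_eq_neg_one_iff cs '>' _ (by omega)]
        intro m hm
        exact hno m (by omega)
      rw [if_neg (not_not_intro hq)]
    · rw [if_neg hp]

theorem pv_tags_step (cs : List Char) (fuel i : Nat) (h : i < cs.length)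
    (hne : cs[i]? ≠ some '<') : tagsB cs fuel i = tagsB cs fuel (i + 1) := by
  cases fuel with
  | zero => rfl
  | succ f =>
    have hff := pv_ff_step cs '<' i h hne
    simp only [tagsB]
    rw [hff]

theorem pv_tags_open (cs : List Char) (fuel i : Nat) (h : i < cs.length)
    (hc : cs[i]? = some '<') (hj : PySem.Chars.findFrom cs ['>'] (i : Int) ≠ -1) :
    tagsB cs (fuel + 1) i = (i, (PySem.Chars.findFrom cs ['>'] (i : Int)).toNat)
      :: tagsB cs fuel ((PySem.Chars.findFrom cs ['>'] (i : Int)).toNat + 1) := by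
  have hp : PySem.Chars.findFrom cs ['<'] (i : Int) = (i : Int) :=
    pv_ff_uniq cs '<' i i (le_of_lt h) (le_refl i) hc (fun m hm1 hm2 => by omega)
  have hgt : PySem.Chars.findFrom cs ['>'] ((i + 1 : Nat) : Int)
      = PySem.Chars.findFrom cs ['>'] (i : Int) :=
    pv_ff_step cs '>' i h (by rw [hc]; simp)
  simp only [tagsB]
  rw [if_pos (by rw [hp]; omega :
      PySem.Chars.findFrom cs ['<'] (i : Int) ≠ -1), hp]
  simp only [Int.toNat_natCast]
  rw [hgt, if_pos hj]

theorem pv_tags_head (cs : List Char) (fuel pos p q : Nat) (rest : List (Nat × Nat))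
    (hpos : pos ≤ cs.length) (h : tagsB cs fuel pos = (p, q) :: rest) : pos ≤ p := by
  cases fuel with
  | zero => simp [tagsB] at h
  | succ f =>
    simp only [tagsB] at h
    split_ifs at h with h1 h2
    obtain ⟨_, ha, _, _, _⟩ := pv_ff_spec cs '<' pos hpos h1
    have hp : (PySem.Chars.findFrom cs ['<'] (pos : Int)).toNat = p := by
      have := List.head_eq_of_cons_eq h
      exact (Prod.mk.injEq _ _ _ _).mp this |>.1
    omega

-- The span list does not depend on the fuel once the fuel is sufficient.
theorem pv_tags_fuel (cs : List Char) :
    ∀ f g pos, pos ≤ cs.length → cs.length - pos < f → cs.length - pos < g →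
    tagsB cs f pos = tagsB cs g pos := by
  intro f
  induction f with
  | zero => intro g pos _ hf _; omega
  | succ f IH =>
    intro g pos hpos hf hg
    cases g with
    | zero => omega
    | succ g =>
      simp only [tagsB]
      by_cases hp : PySem.Chars.findFrom cs ['<'] (pos : Int) ≠ -1
      · obtain ⟨_, hp1, hp2, _, _⟩ := pv_ff_spec cs '<' pos hpos hp
        by_cases hq : PySem.Chars.findFrom cs ['>']
            (((PySem.Chars.findFrom cs ['<'] (pos : Int)).toNat + 1 : Nat) : Int) ≠ -1
        · obtain ⟨_, hq1, hq2, _, _⟩ := pv_ff_spec cs '>' _ (by omega) hq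
          rw [if_pos hp, if_pos hq, IH g _ (by omega) (by omega) (by omega),
            if_pos hp, if_pos hq]
        · rw [if_pos hp, if_neg hq, if_pos hp, if_neg hq]
      · rw [if_neg hp, if_neg hp]

theorem pv_emit_cons (cs : List Char) (i : Nat) (spans : List (Nat × Nat)) (h : i < cs.length)
    (hhead : ∀ p q rest, spans = (p, q) :: rest → i < p) :
    pvEmit cs spans i
      = (cs[i] :: (pvEmit cs spans (i + 1)).1, (i : Int) :: (pvEmit cs spans (i + 1)).2) := by
  cases spans with
  | nil =>
    simp only [pvEmit]
    rw [List.drop_eq_getElem_cons h, PySem.List.pyRange_one_cons (by exact_mod_cast h)]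
    push_cast
    rfl
  | cons pq rest =>
    obtain ⟨p, q⟩ := pq
    have hip : i < p := hhead p q rest rfl
    simp only [pvEmit]
    rw [List.drop_eq_getElem_cons h]
    have hsub : p - i = (p - (i + 1)) + 1 := by omega
    rw [hsub, List.take_succ_cons, PySem.List.pyRange_one_cons (by exact_mod_cast hip)]
    push_cast
    rfl

theorem pv_main (cs : List Char) :
    ∀ fuel i, cs.length - i < fuel → i ≤ cs.length →
    loopA cs fuel i = pvEmit cs (tagsB cs fuel i) i := by
  intro fuel
  induction fuel with
  | zero => intro i hf _; omega
  | succ fuel IH =>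
    intro i hf hi
    by_cases h : i < cs.length
    · have hval : PySem.List.pyGetD cs (i : Int) ' ' = cs[i]'h := by
        rw [PySem.List.pyGetD_natCast]
        simp [List.getD_eq_getElem?_getD, List.getElem?_eq_getElem h]
      by_cases hc : PySem.List.pyGetD cs (i : Int) ' ' = '<'
      · have hce : cs[i]'h = '<' := by rw [← hval, hc]
        have hc? : cs[i]? = some '<' := by rw [List.getElem?_eq_getElem h, hce]
        by_cases hj : PySem.Chars.findFrom cs ['>'] (i : Int) = -1
        · -- unclosed '<': kept literally, and no span can start at or after i
          have hno : ∀ m, i ≤ m → cs[m]? ≠ some '>' :=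
            (pv_ff_eq_neg_one_iff cs '>' i hi).mp hj
          have ht1 : tagsB cs (fuel + 1) i = [] := pv_tags_nogt cs (fuel + 1) i hi hno
          have ht2 : tagsB cs fuel (i + 1) = [] :=
            pv_tags_nogt cs fuel (i + 1) (by omega) (fun m hm => hno m (by omega))
          have hrec := IH (i + 1) (by omega) (by omega)
          simp only [loopA]
          rw [if_pos h, if_pos hc, if_neg (not_not_intro hj), hrec, ht1, ht2, hval]
          exact (pv_emit_cons cs i [] h (by intro p q rest hpq; simp at hpq)).symm
        · -- a closed tag: jump past the '>'
          obtain ⟨_, g1, g2, _, _⟩ := pv_ff_spec cs '>' i hi hj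
          have hrec := IH ((PySem.Chars.findFrom cs ['>'] (i : Int)).toNat + 1)
            (by omega) (by omega)
          simp only [loopA]
          rw [if_pos h, if_pos hc, if_pos hj, hrec, pv_tags_open cs fuel i h hc? hj]
          simp [pvEmit, PySem.List.pyRange_one_eq_nil (le_refl (i : Int))]
      · have hc? : cs[i]? ≠ some '<' := by
          rw [List.getElem?_eq_getElem h]
          simp only [ne_eq, Option.some.injEq]
          rw [← hval]
          exact hc
        have hrec := IH (i + 1) (by omega) (by omega)
        simp only [loopA]
        rw [if_pos h, if_neg hc, hrec,
          ← pv_tags_fuel cs (fuel + 1) fuel (i + 1) (by omega) (by omega) (by omega),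
          ← pv_tags_step cs (fuel + 1) i h hc?, hval]
        refine (pv_emit_cons cs i (tagsB cs (fuel + 1) i) h ?_).symm
        intro p q rest heq
        rw [pv_tags_step cs (fuel + 1) i h hc?] at heq
        have := pv_tags_head cs (fuel + 1) (i + 1) p q rest (by omega) heq
        omega
    · have hie : i = cs.length := by omega
      have ht : tagsB cs (fuel + 1) i = [] := by
        refine pv_tags_nogt cs (fuel + 1) i hi ?_
        intro m hm
        rw [List.getElem?_eq_none (by omega)]
        simp
      simp only [loopA]
      rw [if_neg h, ht]
      simp [pvEmit, hie, List.drop_length,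
        PySem.List.pyRange_one_eq_nil (le_refl ((cs.length : Int)))]

-- ===== VERDICT (by name: the statement is the Claim_ definition above) =====
theorem build_clean_text_index_map_py_spec : Claim_equal_build_clean_text_index_map_py := by
  intro text _
  unfold Spec_build_clean_text_index_map_py
  show build_clean_text_index_map_py text = build_clean_text_index_map_py_alt text
  unfold build_clean_text_index_map_py build_clean_text_index_map_py_alt
  dsimp only
  obtain ⟨hf1, hf2⟩ := pv_fold_emit text.toList (tagsB text.toList (text.toList.length + 1) 0) [] [] 0
  rw [pv_main text.toList (text.toList.length + 1) 0 (by omega) (Nat.zero_le _)]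
  rw [pv_slice_drop, ← List.append_assoc, hf1, hf2]
  simp
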